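-- pv_equiv track=rewrite | github.com/dddraxxx/swe-vision-dev | scripts/setup_mira_eval.py | task_names
-- ===== SOURCE A (Python) =====
-- def task_names(files: list[str]) -> list[str]:
--     tasks = sorted(
--         {
--             path.split("/")[0]
--             for path in files
--             if "/" in path and not path.startswith(".")
--         }
--     )
--     return tasks
-- ===== SOURCE B (Python) =====
-- def _compress(xs):
--     # adjacent-duplicate removal on a (sorted) list, recursively
--     if not xs:
--         return []
--     tail = _compress(xs[1:])
--     if tail and tail[0] == xs[0]:
--         return tail
--     return [xs[0]] + tail
--
--
-- def task_names(files: list[str]) -> list[str]: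
--     comps = [path.split("/")[0] for path in files
--              if "/" in path and not path.startswith(".")]
--     comps.sort()
--     return _compress(comps)
-- ===== Notes on version B (the rewrite author's own statement) =====
-- stated objective: alternative
-- what changed: Uniqueness via a hash set is replaced by sorting the duplicate-bearing list of first components and removing adjacent duplicates in a recursive compression pass.
import Mathlib
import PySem

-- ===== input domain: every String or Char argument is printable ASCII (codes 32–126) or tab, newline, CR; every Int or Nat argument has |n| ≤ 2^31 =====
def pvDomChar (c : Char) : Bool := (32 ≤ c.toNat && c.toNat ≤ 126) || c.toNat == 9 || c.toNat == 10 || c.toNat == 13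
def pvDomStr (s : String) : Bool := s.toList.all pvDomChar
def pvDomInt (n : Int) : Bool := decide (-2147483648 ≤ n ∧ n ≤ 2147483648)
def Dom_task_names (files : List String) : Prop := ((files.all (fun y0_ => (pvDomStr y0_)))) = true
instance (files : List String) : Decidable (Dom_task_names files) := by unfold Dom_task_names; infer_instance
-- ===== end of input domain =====

-- B replaces A's hash-set deduplication by sort-then-adjacent-compress (objective: alternative).

-- ===== PORT A =====
-- path.split("/")[0]; split always returns a nonempty list, so index 0 is its head
def pvFirstComp (p : String) : String :=
  (((PySem.Str.split? p "/").getD []).headD "")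

def pvKeep (p : String) : Bool :=
  PySem.Str.isIn "/" p && !(PySem.Str.startswith p ".")

def task_names (files : List String) : List String :=
  PySem.List.sorted
    (PySem.Set.ofList ((files.filter pvKeep).map pvFirstComp))
    (fun x => x) false

-- ===== PORT B =====
def pvCompress : List String → List String
  | [] => []
  | x :: rest =>
      let t := pvCompress rest
      match t with
      | y :: _ => if y = x then t else x :: t
      | [] => [x]

def task_names_alt (files : List String) : List String :=
  pvCompress
    (PySem.List.sorted ((files.filter pvKeep).map pvFirstComp) (fun x => x) false)

-- ===== PRECONDITION & SPEC =====
def Spec_task_names (files : List String) (out : List String) : Prop := out = task_names_alt files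
instance (files : List String) (out : List String) : Decidable (Spec_task_names files out) := by unfold Spec_task_names; infer_instance

-- ===== CLAIM (what is proved, stated in full; the proofs are below) =====
def Claim_equal_task_names : Prop := ∀ (files : List String), Dom_task_names files → Spec_task_names files (task_names files)

-- ===== LEMMAS AND PROOFS =====

theorem mem_pvCompress (a : String) (xs : List String) : a ∈ pvCompress xs ↔ a ∈ xs := by
  induction xs with
  | nil => simp [pvCompress]
  | cons x rest ih =>
    simp only [pvCompress]
    cases h : pvCompress rest with
    | nil =>
      rw [h] at ih
      simp [← ih]
    | cons y t =>
      rw [h] at ih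
      by_cases hyx : y = x
      · subst hyx
        change (a ∈ if y = y then y :: t else y :: y :: t) ↔ a ∈ y :: rest
        rw [if_pos rfl]
        simp only [List.mem_cons]
        constructor
        · intro hm; exact Or.inr (ih.mp (List.mem_cons.mpr hm))
        · rintro (rfl | hm)
          · exact Or.inl rfl
          · exact List.mem_cons.mp (ih.mpr hm)
      · simp [hyx, ← ih, List.mem_cons]

theorem pairwise_lt_pvCompress (xs : List String)
    (h : xs.Pairwise (· ≤ ·)) : (pvCompress xs).Pairwise (· < ·) := by
  induction xs with
  | nil => simp [pvCompress]
  | cons x rest ih =>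
    rcases List.pairwise_cons.mp h with ⟨hle, hrest⟩
    have iht := ih hrest
    simp only [pvCompress]
    cases hc : pvCompress rest with
    | nil => simp
    | cons y t =>
      rw [hc] at iht
      by_cases hyx : y = x
      · simpa [hyx] using iht
      · have hymem : y ∈ rest := (mem_pvCompress y rest).mp (by rw [hc]; simp)
        have hxy : x < y := lt_of_le_of_ne (hle y hymem) (Ne.symm hyx)
        simp only [hyx, if_false]
        refine List.pairwise_cons.mpr ⟨?_, iht⟩
        intro z hz
        rcases List.mem_cons.mp hz with rfl | hz
        · exact hxy
        · exact lt_trans hxy ((List.pairwise_cons.mp iht).1 z hz)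

theorem nodup_pvCompress (xs : List String) (h : xs.Pairwise (· ≤ ·)) :
    (pvCompress xs).Nodup := by
  exact (pairwise_lt_pvCompress xs h).imp (fun hlt => ne_of_lt hlt)

theorem compress_sorted_eq (L : List String) :
    PySem.List.sorted (PySem.Set.ofList L) (fun x => x) false
      = pvCompress (PySem.List.sorted L (fun x => x) false) := by
  set S := PySem.List.sorted L (fun x => x) false with hS
  have hpw : S.Pairwise (· ≤ ·) := by
    simpa using PySem.List.sorted_pairwise L (fun x => x)
  apply PySem.List.sorted_eq_of_perm_of_pairwise_lt
  · -- (pvCompress S).Perm (Set.ofList L)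
    refine (List.perm_ext_iff_of_nodup (nodup_pvCompress S hpw) (PySem.Set.nodup_ofList _)).mpr ?_
    intro a
    rw [mem_pvCompress, PySem.Set.mem_ofList, hS, PySem.List.mem_sorted]
  · simpa using pairwise_lt_pvCompress S hpw

-- ===== VERDICT (by name: the statement is the Claim_ definition above) =====
theorem task_names_spec : Claim_equal_task_names := by
  intro files _
  unfold Spec_task_names task_names task_names_alt
  exact compress_sorted_eq _
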